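-- pv_equiv track=rewrite | github.com/p-org/P | Src/PChatBot/src/core/validation/p_code_validator.py | _reorder_vars_in_block
-- ===== SOURCE A (Python) =====
-- from typing import List, Tuple, Optional
--
-- def _reorder_vars_in_block(block_lines: List[str]) -> Tuple[List[str], List[str]]:
--     """Reorder variable declarations to come first in a block."""
--     fixes = []
--
--     # Find the opening brace
--     brace_idx = -1
--     for idx, line in enumerate(block_lines):
--         if '{' in line:
--             brace_idx = idx
--             break
--
--     if brace_idx == -1:
--         return block_lines, fixes
--
--     # Separate var declarations from other statements
--     var_decls = []
--     other_stmts = []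
--
--     for idx in range(brace_idx + 1, len(block_lines)):
--         line = block_lines[idx]
--         stripped = line.strip()
--
--         # Skip empty lines and closing braces at the end
--         if not stripped or stripped == '}':
--             other_stmts.append(line)
--             continue
--
--         # Check if it's a var declaration
--         if stripped.startswith('var ') and ';' in stripped:
--             var_decls.append(line)
--         else:
--             other_stmts.append(line)
--
--     # Check if we need to reorder
--     if var_decls and other_stmts:
--         # Check if vars were not at the start
--         first_non_empty = next((l for l in other_stmts if l.strip() and l.strip() != '}'), None)
--         if first_non_empty and not first_non_empty.strip().startswith('var '):
--             # Need to reorder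
--             fixes.append(f"Moved {len(var_decls)} var declaration(s) to start of block")
--
--             # Reconstruct block
--             result = block_lines[:brace_idx + 1]  # Up to and including opening brace
--             result.extend(var_decls)
--             result.extend([l for l in other_stmts if l.strip() and l.strip() != '}'])
--             result.extend([l for l in other_stmts if l.strip() == '}' or not l.strip()])
--             return result, fixes
--
--     return block_lines, fixes
-- ===== SOURCE B (Python) =====
-- from typing import List, Tuple
--
-- def _reorder_vars_in_block(block_lines: List[str]) -> Tuple[List[str], List[str]]:
--     """Reorder variable declarations to come first in a block (stable-sort formulation)."""
--     brace_idx = next((i for i, l in enumerate(block_lines) if '{' in l), None)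
--     if brace_idx is None:
--         return block_lines, []
--
--     post = block_lines[brace_idx + 1:]
--
--     def cat(line):
--         s = line.strip()
--         if not s or s == '}':
--             return 2
--         if s.startswith('var ') and ';' in s:
--             return 0
--         return 1
--
--     nvars = sum(1 for l in post if cat(l) == 0)
--     first_real = next((l for l in post if cat(l) == 1), None)
--
--     if nvars and first_real is not None and not first_real.strip().startswith('var '):
--         fixes = [f"Moved {nvars} var declaration(s) to start of block"]
--         return block_lines[:brace_idx + 1] + sorted(post, key=cat), fixes
--     return block_lines, []
-- ===== Notes on version B (the rewrite author's own statement) =====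
-- stated objective: alternative
-- what changed: Replaces A's partition-into-two-lists plus two re-filtering comprehensions with a single stable sort of the post-brace lines under a 3-valued category key (var-decl / real statement / blank-or-brace), whose stability reproduces A's layout in one pass.
import Mathlib
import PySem

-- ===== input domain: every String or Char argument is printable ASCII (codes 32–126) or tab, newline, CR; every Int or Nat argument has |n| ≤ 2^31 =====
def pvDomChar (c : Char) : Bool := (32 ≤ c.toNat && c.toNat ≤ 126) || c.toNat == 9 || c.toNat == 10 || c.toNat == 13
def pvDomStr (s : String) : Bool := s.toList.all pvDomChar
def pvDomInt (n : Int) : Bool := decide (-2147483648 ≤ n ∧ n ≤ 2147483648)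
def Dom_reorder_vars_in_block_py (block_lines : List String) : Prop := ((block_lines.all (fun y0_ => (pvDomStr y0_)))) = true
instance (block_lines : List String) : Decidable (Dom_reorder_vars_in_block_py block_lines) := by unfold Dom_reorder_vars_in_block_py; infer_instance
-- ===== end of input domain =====

-- B replaces A's partition-plus-two-comprehensions reconstruction with one stable sort of the
-- post-brace lines under a 3-valued category key; same return value, similar cost (objective: alternative).

-- ===== PORT A =====
-- A's 'for idx, line in enumerate(block_lines): if '{' in line: brace_idx = idx; break'
def pvFindBraceA : List String → Int → Int
  | [], _ => -1
  | l :: ls, idx => if PySem.Str.isIn "{" l then idx else pvFindBraceA ls (idx + 1)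

def reorder_vars_in_block_py (block_lines : List String) : List String × List String :=
  let fixes : List String := []
  let brace_idx := pvFindBraceA block_lines 0
  if brace_idx == -1 then (block_lines, fixes)
  else
    -- for idx in range(brace_idx + 1, len(block_lines)): classify into var_decls / other_stmts
    let st :=
      (PySem.List.pyRange (brace_idx + 1) (PySem.List.len block_lines) 1).foldl
        (fun (acc : List String × List String) idx =>
          let line := PySem.List.pyGetD block_lines idx ""
          let stripped := PySem.Str.strip line
          if stripped == "" || stripped == "}" then (acc.1, acc.2 ++ [line])
          else if PySem.Str.startswith stripped "var " && PySem.Str.isIn ";" stripped then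
            (acc.1 ++ [line], acc.2)
          else (acc.1, acc.2 ++ [line]))
        ([], [])
    let var_decls := st.1
    let other_stmts := st.2
    if var_decls ≠ [] ∧ other_stmts ≠ [] then
      match other_stmts.find? (fun l => !(PySem.Str.strip l == "") && !(PySem.Str.strip l == "}")) with
      | some first_non_empty =>
        if !(PySem.Str.startswith (PySem.Str.strip first_non_empty) "var ") then
          let fixes := fixes ++ ["Moved " ++ PySem.Int.toStr (var_decls.length : Int) ++ " var declaration(s) to start of block"]
          let result := PySem.List.slice block_lines none (some (brace_idx + 1))
          let result := result ++ var_decls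
          let result := result ++ other_stmts.filter (fun l => !(PySem.Str.strip l == "") && !(PySem.Str.strip l == "}"))
          let result := result ++ other_stmts.filter (fun l => PySem.Str.strip l == "}" || PySem.Str.strip l == "")
          (result, fixes)
        else (block_lines, fixes)
      | none => (block_lines, fixes)
    else (block_lines, fixes)

-- ===== PORT B =====
def pvCat (line : String) : Nat :=
  let s := PySem.Str.strip line
  if s == "" || s == "}" then 2
  else if PySem.Str.startswith s "var " && PySem.Str.isIn ";" s then 0
  else 1

def reorder_vars_in_block_py_alt (block_lines : List String) : List String × List String :=
  match (PySem.List.enumerate block_lines 0).find? (fun p => PySem.Str.isIn "{" p.2) with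
  | none => (block_lines, [])
  | some p =>
    let brace_idx := p.1
    let post := PySem.List.slice block_lines (some (brace_idx + 1)) none
    let nvars := post.countP (fun l => pvCat l == 0)
    match post.find? (fun l => pvCat l == 1) with
    | some first_real =>
      if nvars != 0 && !(PySem.Str.startswith (PySem.Str.strip first_real) "var ") then
        (PySem.List.slice block_lines none (some (brace_idx + 1)) ++ PySem.List.sorted post pvCat,
         ["Moved " ++ PySem.Int.toStr (nvars : Int) ++ " var declaration(s) to start of block"])
      else (block_lines, [])
    | none => (block_lines, [])

-- ===== PRECONDITION & SPEC =====
def Spec_reorder_vars_in_block_py (block_lines : List String) (out : List String × List String) : Prop := out = reorder_vars_in_block_py_alt block_lines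
instance (block_lines : List String) (out : List String × List String) : Decidable (Spec_reorder_vars_in_block_py block_lines out) := by unfold Spec_reorder_vars_in_block_py; infer_instance

-- ===== CLAIM (what is proved, stated in full; the proofs are below) =====
def Claim_equal_reorder_vars_in_block_py : Prop := ∀ (block_lines : List String), Dom_reorder_vars_in_block_py block_lines → Spec_reorder_vars_in_block_py block_lines (reorder_vars_in_block_py block_lines)

-- ===== LEMMAS AND PROOFS =====

-- proof-side abbreviations for the two tests both programs make on a line
def pvBlank (l : String) : Bool := PySem.Str.strip l == "" || PySem.Str.strip l == "}"
def pvVar (l : String) : Bool :=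
  PySem.Str.startswith (PySem.Str.strip l) "var " && PySem.Str.isIn ";" (PySem.Str.strip l)

lemma pvCat_eq (l : String) :
    pvCat l = if pvBlank l then 2 else if pvVar l then 0 else 1 := by
  simp [pvCat, pvBlank, pvVar]

lemma pvCat_cases (l : String) : pvCat l = 0 ∨ pvCat l = 1 ∨ pvCat l = 2 := by
  rw [pvCat_eq]; split_ifs <;> simp

lemma cat0_fun : (fun l => pvCat l == 0) = (fun l => !pvBlank l && pvVar l) := by
  funext l; rw [pvCat_eq]; cases h1 : pvBlank l <;> cases h2 : pvVar l <;> simp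

lemma cat1_fun : (fun l => pvCat l == 1) = (fun l => !pvBlank l && !pvVar l) := by
  funext l; rw [pvCat_eq]; cases h1 : pvBlank l <;> cases h2 : pvVar l <;> simp

lemma cat2_fun : (fun l => pvCat l == 2) = (fun l => pvBlank l) := by
  funext l; rw [pvCat_eq]; cases h1 : pvBlank l <;> cases h2 : pvVar l <;> simp

-- the brace-scan loop of A agrees with B's next(enumerate) search
lemma findBraceA_eq : ∀ (ls : List String) (i : Int),
    pvFindBraceA ls i =
      ((PySem.List.enumerate ls i).find? (fun p => PySem.Str.isIn "{" p.2)).elim (-1) (·.1) := by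
  intro ls; induction ls with
  | nil => intro i; simp [pvFindBraceA, PySem.List.enumerate_nil]
  | cons l ls ih =>
    intro i
    simp only [pvFindBraceA, PySem.List.enumerate_cons, List.find?_cons, PySem.Str.isIn_eq]
    cases h : PySem.Chars.isIn ['{'] l.toList <;> simp [h, ih]

-- stable insertion into a key-grouped list lands at the end of the matching group
lemma insertBy_middle (x : String) (as bs : List String)
    (h1 : ∀ y ∈ as, ¬ (pvCat x < pvCat y)) (h2 : ∀ y ∈ bs, pvCat x < pvCat y) :
    PySem.List.insertBy (fun a b => decide (pvCat a < pvCat b)) x (as ++ bs) = as ++ x :: bs := by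
  induction as with
  | nil =>
    cases bs with
    | nil => simp [PySem.List.insertBy]
    | cons y ys => simp [PySem.List.insertBy, h2 y (by simp)]
  | cons a as ih =>
    have ha : ¬ (pvCat x < pvCat a) := h1 a (by simp)
    simp only [List.cons_append, PySem.List.insertBy, decide_eq_true_eq, if_neg ha]
    rw [ih (fun y hy => h1 y (by simp [hy]))]

lemma foldl_insertBy_cat3 : ∀ (xs g0 g1 g2 : List String),
    (∀ y ∈ g0, pvCat y = 0) → (∀ y ∈ g1, pvCat y = 1) → (∀ y ∈ g2, pvCat y = 2) →
    xs.foldl (fun acc x => PySem.List.insertBy (fun a b => decide (pvCat a < pvCat b)) x acc) (g0 ++ g1 ++ g2)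
      = (g0 ++ xs.filter (fun l => pvCat l == 0)) ++ (g1 ++ xs.filter (fun l => pvCat l == 1))
          ++ (g2 ++ xs.filter (fun l => pvCat l == 2)) := by
  intro xs
  induction xs with
  | nil => intro g0 g1 g2 _ _ _; simp
  | cons x xs ih =>
    intro g0 g1 g2 h0 h1 h2
    rcases pvCat_cases x with hx | hx | hx
    · have hins : PySem.List.insertBy (fun a b => decide (pvCat a < pvCat b)) x (g0 ++ g1 ++ g2)
          = (g0 ++ [x]) ++ g1 ++ g2 := by
        have := insertBy_middle x g0 (g1 ++ g2)
          (fun y hy => by rw [hx, h0 y hy]; omega)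
          (fun y hy => by
            rcases List.mem_append.1 hy with hy | hy
            · rw [hx, h1 y hy]; omega
            · rw [hx, h2 y hy]; omega)
        simpa [List.append_assoc] using this
      rw [List.foldl_cons, hins,
        ih (g0 ++ [x]) g1 g2
          (fun y hy => by rcases List.mem_append.1 hy with hy | hy; exact h0 y hy; simpa [List.mem_singleton.1 hy] using hx)
          h1 h2]
      simp [List.filter_cons, hx, List.append_assoc]
    · have hins : PySem.List.insertBy (fun a b => decide (pvCat a < pvCat b)) x (g0 ++ g1 ++ g2)
          = g0 ++ (g1 ++ [x]) ++ g2 := by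
        have := insertBy_middle x (g0 ++ g1) g2
          (fun y hy => by
            rcases List.mem_append.1 hy with hy | hy
            · rw [hx, h0 y hy]; omega
            · rw [hx, h1 y hy]; omega)
          (fun y hy => by rw [hx, h2 y hy]; omega)
        rw [this]; simp [List.append_assoc]
      rw [List.foldl_cons, hins,
        ih g0 (g1 ++ [x]) g2 h0
          (fun y hy => by rcases List.mem_append.1 hy with hy | hy; exact h1 y hy; simpa [List.mem_singleton.1 hy] using hx)
          h2]
      simp [List.filter_cons, hx, List.append_assoc]
    · have hins : PySem.List.insertBy (fun a b => decide (pvCat a < pvCat b)) x (g0 ++ g1 ++ g2)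
          = g0 ++ g1 ++ (g2 ++ [x]) := by
        have := PySem.List.insertBy_of_forall_not_before (fun a b => decide (pvCat a < pvCat b)) x
          (g0 ++ g1 ++ g2)
          (fun y hy => by
            simp only [decide_eq_false_iff_not]
            rcases List.mem_append.1 hy with hy' | hy'
            · rcases List.mem_append.1 hy' with hy'' | hy''
              · rw [hx, h0 y hy'']; omega
              · rw [hx, h1 y hy'']; omega
            · rw [hx, h2 y hy']; omega)
        rw [this]; simp [List.append_assoc]
      rw [List.foldl_cons, hins,
        ih g0 g1 (g2 ++ [x]) h0 h1
          (fun y hy => by rcases List.mem_append.1 hy with hy | hy; exact h2 y hy; simpa [List.mem_singleton.1 hy] using hx)]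
      simp [List.filter_cons, hx, List.append_assoc]

lemma sorted_cat3 (xs : List String) :
    PySem.List.sorted xs pvCat
      = xs.filter (fun l => pvCat l == 0) ++ xs.filter (fun l => pvCat l == 1)
          ++ xs.filter (fun l => pvCat l == 2) := by
  rw [PySem.List.sorted_eq_foldl_insertBy]
  simpa using foldl_insertBy_cat3 xs [] [] [] (by simp) (by simp) (by simp)

-- find? over a filter
lemma find?_filter' {α : Type} (l : List α) (p q : α → Bool) :
    (l.filter p).find? q = l.find? (fun x => p x && q x) := by
  induction l with
  | nil => rfl
  | cons x xs ih =>
    by_cases hp : p x = true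
    · by_cases hq : q x = true
      · simp [List.filter_cons, hp, List.find?_cons, hq]
      · simp only [Bool.not_eq_true] at hq
        simp [List.filter_cons, hp, List.find?_cons, hq, ih]
    · simp only [Bool.not_eq_true] at hp
      simp [List.filter_cons, hp, List.find?_cons, ih]

-- A's classification loop over indices = the pair of filters of the post-brace suffix
lemma stepA_eq :
    (fun (acc : List String × List String) (line : String) =>
        let stripped := PySem.Str.strip line
        if stripped == "" || stripped == "}" then (acc.1, acc.2 ++ [line])
        else if PySem.Str.startswith stripped "var " && PySem.Str.isIn ";" stripped then
          (acc.1 ++ [line], acc.2)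
        else (acc.1, acc.2 ++ [line]))
      = (fun s line => ((if !pvBlank line && pvVar line then s.1 ++ [line] else s.1),
                        (if pvBlank line || !pvVar line then s.2 ++ [line] else s.2))) := by
  funext s line
  show (if pvBlank line then _ else if pvVar line then _ else _) = _
  cases h1 : pvBlank line <;> cases h2 : pvVar line <;> simp [h1, h2]

lemma partitionA_eq (xs : List String) :
    xs.foldl
        (fun (acc : List String × List String) (line : String) =>
          let stripped := PySem.Str.strip line
          if stripped == "" || stripped == "}" then (acc.1, acc.2 ++ [line])
          else if PySem.Str.startswith stripped "var " && PySem.Str.isIn ";" stripped then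
            (acc.1 ++ [line], acc.2)
          else (acc.1, acc.2 ++ [line]))
        ([], [])
      = (xs.filter (fun l => !pvBlank l && pvVar l), xs.filter (fun l => pvBlank l || !pvVar l)) := by
  rw [stepA_eq,
    PySem.List.foldl_prod_mk
      (f := fun acc line => if !pvBlank line && pvVar line then acc ++ [line] else acc)
      (g := fun acc line => if pvBlank line || !pvVar line then acc ++ [line] else acc)]
  rw [PySem.List.foldl_append_if_eq_filter, PySem.List.foldl_append_if_eq_filter]
  simp

-- boolean algebra on the two tests
lemma otherReal_fun :
    (fun l => (pvBlank l || !pvVar l) && !pvBlank l) = (fun l => !pvBlank l && !pvVar l) := by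
  funext l; cases h1 : pvBlank l <;> cases h2 : pvVar l <;> simp [h1, h2]

lemma otherReal_fun2 :
    (fun l => !pvBlank l && (pvBlank l || !pvVar l)) = (fun l => !pvBlank l && !pvVar l) := by
  funext l; cases h1 : pvBlank l <;> cases h2 : pvVar l <;> simp [h1, h2]

lemma partitionA_range (bl : List String) (a : Int) (h : 0 ≤ a) :
    (PySem.List.pyRange (a) (PySem.List.len bl) 1).foldl
        (fun (acc : List String × List String) idx =>
          let line := PySem.List.pyGetD bl idx ""
          let stripped := PySem.Str.strip line
          if stripped == "" || stripped == "}" then (acc.1, acc.2 ++ [line])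
          else if PySem.Str.startswith stripped "var " && PySem.Str.isIn ";" stripped then
            (acc.1 ++ [line], acc.2)
          else (acc.1, acc.2 ++ [line])) ([], [])
      = ((bl.drop a.toNat).filter (fun l => !pvBlank l && pvVar l),
         (bl.drop a.toNat).filter (fun l => pvBlank l || !pvVar l)) := by
  rw [PySem.List.foldl_pyRange_pyGetD (xs := bl) (d := "")
    (f := fun (acc : List String × List String) (line : String) =>
      let stripped := PySem.Str.strip line
      if stripped == "" || stripped == "}" then (acc.1, acc.2 ++ [line])
      else if PySem.Str.startswith stripped "var " && PySem.Str.isIn ";" stripped then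
        (acc.1 ++ [line], acc.2)
      else (acc.1, acc.2 ++ [line])) (init := (([], []) : List String × List String)) h]
  exact partitionA_eq _

lemma notBlank_fun :
    (fun l => !(PySem.Str.strip l == "") && !(PySem.Str.strip l == "}")) = (fun l => !pvBlank l) := by
  funext l; simp [pvBlank]

lemma blankOther_fun :
    (fun l => (PySem.Str.strip l == "}" || PySem.Str.strip l == "") && (pvBlank l || !pvVar l))
      = (fun l => pvBlank l) := by
  funext l; simp only [pvBlank]
  cases h1 : PySem.Str.strip l == "" <;> cases h2 : PySem.Str.strip l == "}" <;>
    cases h3 : pvVar l <;> simp [h1, h2, h3]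

-- ===== VERDICT (by name: the statement is the Claim_ definition above) =====
theorem reorder_vars_in_block_py_spec : Claim_equal_reorder_vars_in_block_py := by
  intro block_lines _dom
  unfold Spec_reorder_vars_in_block_py reorder_vars_in_block_py reorder_vars_in_block_py_alt
  cases hfb : (PySem.List.enumerate block_lines 0).find? (fun p => PySem.Str.isIn "{" p.2) with
  | none =>
      rw [findBraceA_eq, hfb]
      simp
  | some p =>
      have hp := List.mem_of_find?_eq_some hfb
      rw [PySem.List.mem_enumerate_iff] at hp
      obtain ⟨k, hk, hpk⟩ := hp
      have hp1 : p.1 = (k : Int) := by rw [hpk]; simp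
      rw [findBraceA_eq, hfb]
      have h0le : (0 : Int) ≤ p.1 + 1 := by rw [hp1]; omega
      have hne : (p.1 == (-1 : Int)) = false := by
        rw [hp1]; simp only [beq_eq_false_iff_ne, ne_eq]; omega
      simp only [Option.elim, hne, Bool.false_eq_true, if_false]
      rw [partitionA_range block_lines (p.1 + 1) h0le, PySem.List.slice_from block_lines h0le]
      dsimp only
      rw [notBlank_fun, find?_filter', otherReal_fun, cat1_fun, cat0_fun]
      set post := List.drop (p.1 + 1).toNat block_lines with hpostdef
      cases hfr : List.find? (fun l => !pvBlank l && !pvVar l) post with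
      | none =>
          simp only [hfr]
          split_ifs <;> rfl
      | some fr =>
          have hfrP := List.find?_some hfr
          rw [Bool.and_eq_true, Bool.not_eq_true', Bool.not_eq_true'] at hfrP
          obtain ⟨hbfr, hvfr⟩ := hfrP
          have hfrmem := List.mem_of_find?_eq_some hfr
          have hotherne : post.filter (fun l => pvBlank l || !pvVar l) ≠ [] :=
            List.ne_nil_of_mem (List.mem_filter.2 ⟨hfrmem, by simp [hbfr, hvfr]⟩)
          simp only [hfr]
          cases hsw : PySem.Str.startswith (PySem.Str.strip fr) "var " with
          | true =>
              simp only [hsw, Bool.not_true, Bool.and_false, Bool.false_eq_true, if_false]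
              split_ifs <;> rfl
          | false =>
              by_cases hvd : post.filter (fun l => !pvBlank l && pvVar l) = []
              · simp only [hvd, List.countP_eq_length_filter, List.length_nil]
                simp [hsw]
              · have hcp : (post.countP (fun l => !pvBlank l && pvVar l) != 0) = true := by
                  simp only [List.countP_eq_length_filter, bne_iff_ne, ne_eq]
                  simpa using hvd
                rw [if_pos ⟨hvd, hotherne⟩]
                simp only [Bool.not_false, Bool.and_true, hcp, if_pos]
                rw [List.filter_filter, List.filter_filter, otherReal_fun2, blankOther_fun,
                  sorted_cat3, cat0_fun, cat1_fun, cat2_fun, List.countP_eq_length_filter]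
                simp [List.append_assoc]
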